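-- pv_equiv track=rewrite | github.com/introverter/git_test_new | contest256D.py | grade_runners
-- ===== SOURCE A (Python) =====
-- def grade_runners(amount, times):
--     sorted_results = {}
--     sorted_times = sorted(times)
--     last_time = 1
--     sorted_results[sorted_times[0]] = 0
--
--     for count in range(1, amount):
--         if sorted_times[count] in sorted_results:
--             last_time += 1
--             continue
--         elif sorted_times[count] > (sorted_times[count-1] + 1):
--             sorted_results[sorted_times[count]] = count
--             last_time = 1
--         else:
--             sorted_results[sorted_times[count]] = count - last_time
--             last_time += 1
--
--     return [sorted_results[i]+1 for i in times]
-- ===== SOURCE B (Python) =====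
-- def grade_runners(amount, times):
--     # chain-of-consecutive-integers view: the cutoff is the slowest graded time;
--     # a graded value's rank is the number of times strictly below the minimum of
--     # its chain of consecutive present values (found by walking down a set).
--     cutoff = sorted(times)[amount - 1]
--     present = set(times)
--     rank = {}
--     for v in present:
--         if v <= cutoff:
--             w = v
--             while w - 1 in present:
--                 w -= 1
--             rank[v] = sum(1 for x in times if x < w)
--     return [rank[t] + 1 for t in times]
-- ===== Notes on version B (the rewrite author's own statement) =====
-- stated objective: alternative
-- what changed: B replaces A's stateful scan of the sorted prefix (dict-membership test, last_time accumulator) by an index-free computation: it sorts only to read the cutoff time, finds each graded value's chain-of-consecutive-integers minimum by walking down through a set of the times, and takes as rank the count of times strictly below that minimum.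
-- outside the precondition, e.g. on grade_runners(-2, [5]): A returns [1], B raises IndexError
import Mathlib
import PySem

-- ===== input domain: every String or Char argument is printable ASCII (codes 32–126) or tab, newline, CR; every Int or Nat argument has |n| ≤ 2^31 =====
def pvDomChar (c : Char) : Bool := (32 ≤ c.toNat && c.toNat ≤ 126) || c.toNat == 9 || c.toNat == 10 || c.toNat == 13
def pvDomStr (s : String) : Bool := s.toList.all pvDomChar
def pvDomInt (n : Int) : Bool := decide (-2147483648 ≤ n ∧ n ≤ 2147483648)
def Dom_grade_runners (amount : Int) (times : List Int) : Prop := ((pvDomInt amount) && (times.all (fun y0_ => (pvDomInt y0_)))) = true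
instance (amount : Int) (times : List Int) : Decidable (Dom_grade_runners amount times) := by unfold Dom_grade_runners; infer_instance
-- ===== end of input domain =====

-- B sorts only to read the cutoff time and computes ranks without scanning the sorted list: each
-- graded value's chain minimum is found by walking down through a set of the times, and its rank is
-- the count of strictly smaller times; equal return values on Pre_.

-- ===== PORT A =====
-- body of A's `for count in range(1, amount)` loop; state = (sorted_results, last_time)
def stepA (st : List Int) (s : PySem.Dict Int Int × Int) (count : Int) : PySem.Dict Int Int × Int :=
  let v := PySem.List.pyGetD st count 0
  if s.1.contains v then (s.1, s.2 + 1)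
  else if v > PySem.List.pyGetD st (count - 1) 0 + 1 then (s.1.insert v count, 1)
  else (s.1.insert v (count - s.2), s.2 + 1)

def loopA (st : List Int) (amount : Int) : PySem.Dict Int Int × Int :=
  (PySem.List.pyRange 1 amount 1).foldl (stepA st)
    ((PySem.Dict.empty).insert (PySem.List.pyGetD st 0 0) 0, 1)

def grade_runners (amount : Int) (times : List Int) : List Int :=
  let st := PySem.List.sorted times (fun x => x) false
  let s := loopA st amount
  times.map (fun t => s.1.getD t 0 + 1)

-- ===== PORT B =====
-- termination of B's `while w - 1 in present` walk (cited by walkMin's decreasing_by)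
theorem countBelow_down (present : List Int) (w : Int) (h : w - 1 ∈ present) :
    (present.filter (fun x => decide (x < w - 1))).length <
      (present.filter (fun x => decide (x < w))).length := by
  rw [← List.countP_eq_length_filter, ← List.countP_eq_length_filter]
  induction present with
  | nil => cases h
  | cons a t ih =>
    rw [List.countP_cons, List.countP_cons]
    rcases List.mem_cons.1 h with rfl | ha
    · have hle : t.countP (fun x => decide (x < w - 1)) ≤ t.countP (fun x => decide (x < w)) := by
        apply List.countP_mono_left; intro x _ hx; simp at *; omega
      simp; omega
    · have := ih ha; by_cases h1 : a < w - 1 <;> by_cases h2 : a < w <;> simp [h1, h2] <;> omega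

-- `while w - 1 in present: w -= 1`
def walkMin (present : List Int) (w : Int) : Int :=
  if h : (w - 1) ∈ present then walkMin present (w - 1) else w
termination_by (present.filter (fun x => decide (x < w))).length
decreasing_by exact countBelow_down present w h

-- `sum(1 for x in times if x < w)`
def countBelow (times : List Int) (w : Int) : Int :=
  times.foldl (fun acc x => if x < w then acc + 1 else acc) 0

def grade_runners_alt (amount : Int) (times : List Int) : List Int :=
  let cutoff := PySem.List.pyGetD (PySem.List.sorted times (fun x => x) false) (amount - 1) 0
  let present : PySem.Set Int := PySem.Set.ofList times
  let rank := present.foldl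
    (fun d v => if v ≤ cutoff
      then d.insert v (countBelow times (walkMin present v)) else d) PySem.Dict.empty
  times.map (fun t => rank.getD t 0 + 1)

-- ===== PRECONDITION & SPEC =====
-- Pre_ excludes exactly the inputs where A or B raises: A raises on empty times, amount >
-- len(times) (IndexError) and on any time beyond the (max(amount,1)-1)-th sorted value (KeyError);
-- B additionally raises IndexError when amount - 1 wraps below -len(times), where A still grades an
-- all-equal list (its unconditional seeding of sorted_times[0]) — that corner is excluded too.
def Pre_grade_runners (amount : Int) (times : List Int) : Prop :=
  times ≠ [] ∧ amount ≤ (times.length : Int) ∧ 1 - (times.length : Int) ≤ amount ∧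
  ∀ t ∈ times, t ≤ PySem.List.pyGetD (PySem.List.sorted times (fun x => x) false) (max (amount - 1) 0) 0
instance (amount : Int) (times : List Int) : Decidable (Pre_grade_runners amount times) := by
  unfold Pre_grade_runners; infer_instance

def pvWitness_grade_runners : Int × List Int := (3, [5, 3, 4])

def Spec_grade_runners (amount : Int) (times : List Int) (out : List Int) : Prop := out = grade_runners_alt amount times
instance (amount : Int) (times : List Int) (out : List Int) : Decidable (Spec_grade_runners amount times out) := by unfold Spec_grade_runners; infer_instance

-- ===== CLAIM (what is proved, stated in full; the proofs are below) =====
def Claim_equal_grade_runners : Prop := ∀ (amount : Int) (times : List Int), Dom_grade_runners amount times → Pre_grade_runners amount times → Spec_grade_runners amount times (grade_runners amount times)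

-- ===== LEMMAS AND PROOFS =====

-- monotonicity of the sorted list, in getD form
theorem sorted_getD_mono (times : List Int) :
    ∀ p q : Nat, p ≤ q → q < (PySem.List.sorted times (fun x => x) false).length →
      (PySem.List.sorted times (fun x => x) false).getD p 0 ≤ (PySem.List.sorted times (fun x => x) false).getD q 0 := by
  intro p q hpq hq
  rcases eq_or_lt_of_le hpq with rfl | hlt
  · exact le_refl _
  · have hpw := PySem.List.sorted_pairwise (xs := times) (key := fun x => x) (κ := Int)
    rw [List.pairwise_iff_getElem] at hpw
    rw [List.getD_eq_getElem _ _ (lt_trans hlt hq), List.getD_eq_getElem _ _ hq]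
    exact hpw p q (lt_trans hlt hq) hq hlt

-- the chain-start index of position j in the sorted list: start of the maximal run with gaps ≤ 1
def cs (st : List Int) : Nat → Nat
  | 0 => 0
  | j+1 => if st.getD (j+1) 0 > st.getD j 0 + 1 then j+1 else cs st j

theorem cs_le (st : List Int) (j : Nat) : cs st j ≤ j := by
  induction j with
  | zero => simp [cs]
  | succ j ih =>
    rw [cs]
    split_ifs with h <;> omega

theorem cs_gap (st : List Int) (j m : Nat) (h : cs st j = m + 1) :
    st.getD (m+1) 0 > st.getD m 0 + 1 := by
  induction j with
  | zero => simp [cs] at h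
  | succ j ih =>
    rw [cs] at h
    split_ifs at h with hg
    · have : j = m := by omega
      subst this; exact hg
    · exact ih h

theorem cs_const (st : List Int)
    (hmono : ∀ p q : Nat, p ≤ q → q < st.length → st.getD p 0 ≤ st.getD q 0)
    (p : Nat) : ∀ q : Nat, p ≤ q → q < st.length → st.getD p 0 = st.getD q 0 →
    cs st p = cs st q := by
  intro q
  induction q with
  | zero =>
    intro h _ _
    have hp0 : p = 0 := by omega
    subst hp0
    rfl
  | succ q ih =>
    intro hpq hq heq
    rcases Nat.lt_or_ge p (q+1) with hlt | hge
    · have hq' : q < st.length := by omega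
      have h1 : st.getD p 0 ≤ st.getD q 0 := hmono p q (by omega) hq'
      have h2 : st.getD q 0 ≤ st.getD (q+1) 0 := hmono q (q+1) (by omega) hq
      have hnogap : ¬ (st.getD (q+1) 0 > st.getD q 0 + 1) := by omega
      rw [cs, if_neg hnogap]
      exact ih (by omega) hq' (by omega)
    · have : p = q + 1 := by omega
      subst this; rfl

-- the two loop steps of A, in successor form
theorem loopA_succ (st : List Int) (n : Nat) (h1 : 1 ≤ n) :
    loopA st ((n : Int) + 1) = stepA st (loopA st (n : Int)) (n : Int) := by
  unfold loopA
  rw [PySem.List.pyRange_one_succ_right (by exact_mod_cast h1), List.foldl_append]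
  rfl

-- A's loop invariant: the dict maps st[j] to the chain-start index cs j, and last_time = n - cs (n-1)
theorem invA (st : List Int)
    (hmono : ∀ p q : Nat, p ≤ q → q < st.length → st.getD p 0 ≤ st.getD q 0) :
    ∀ n : Nat, 1 ≤ n → n ≤ st.length →
    ((∀ j, j < n → (loopA st (n : Int)).1.get? (st.getD j 0) = some ((cs st j : Int)))
    ∧ (loopA st (n : Int)).2 = (n : Int) - (cs st (n-1) : Int)
    ∧ (∀ k, (loopA st (n : Int)).1.contains k = true ↔ ∃ j, j < n ∧ st.getD j 0 = k)) := by
  intro n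
  induction n with
  | zero => omega
  | succ m ih =>
    intro _ hn
    rcases Nat.lt_or_ge m 1 with hm0 | hm1
    · -- m = 0: the state before the loop
      have hm : m = 0 := by omega
      subst hm
      have ha : loopA st ((1 : Nat) : Int) = ((PySem.Dict.empty).insert (st.getD 0 0) 0, 1) := by
        unfold loopA
        rw [show (((1 : Nat) : Int)) = 1 from rfl, PySem.List.pyRange_one_eq_nil (le_refl 1)]
        simp [PySem.List.pyGetD_zero]
      refine ⟨?_, ?_, ?_⟩
      · intro j hj
        have hj0 : j = 0 := by omega
        subst hj0
        rw [ha]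
        simp [PySem.Dict.get?_insert_self, cs]
      · rw [ha]; simp [cs]
      · intro k
        rw [ha]
        simp only [PySem.Dict.contains_insert, PySem.Dict.contains_empty, Bool.or_false, beq_iff_eq]
        constructor
        · intro h; exact ⟨0, by omega, by omega⟩
        · rintro ⟨j, hj, hjk⟩
          have hj0 : j = 0 := by omega
          subst hj0; omega
    · obtain ⟨ih1, ih2, ih3⟩ := ih hm1 (by omega)
      have hcast : (((m + 1 : Nat)) : Int) = ((m : Nat) : Int) + 1 := by push_cast; ring
      rw [hcast, loopA_succ st m hm1]
      have hv : PySem.List.pyGetD st ((m : Nat) : Int) 0 = st.getD m 0 :=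
        PySem.List.pyGetD_natCast st m 0
      have hp : PySem.List.pyGetD st (((m : Nat) : Int) - 1) 0 = st.getD (m - 1) 0 := by
        rw [show (((m : Nat) : Int) - 1) = (((m - 1 : Nat)) : Int) by omega,
          PySem.List.pyGetD_natCast]
      have hple : st.getD (m - 1) 0 ≤ st.getD m 0 := hmono (m - 1) m (by omega) (by omega)
      have hsucc : m + 1 - 1 = m := by omega
      have hcsle := cs_le st m
      obtain ⟨mm, rfl⟩ : ∃ mm, m = mm + 1 := ⟨m - 1, by omega⟩
      simp only [Nat.add_sub_cancel] at hp hple ih2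
      by_cases hc : (loopA st (((mm+1 : Nat)) : Int)).1.contains (st.getD (mm+1) 0) = true
      · -- duplicate: A skips; st[mm+1] = st[mm], so cs (mm+1) = cs mm
        obtain ⟨j, hj, hjv⟩ := (ih3 _).1 hc
        have hvp : st.getD (mm+1) 0 = st.getD mm 0 :=
          le_antisymm (hjv ▸ hmono j mm (by omega) (by omega)) hple
        have hcs : cs st (mm+1) = cs st mm := by
          rw [cs, if_neg (by omega)]
        have hAstep : stepA st (loopA st (((mm+1 : Nat)) : Int)) (((mm+1 : Nat)) : Int)
            = ((loopA st (((mm+1 : Nat)) : Int)).1, (loopA st (((mm+1 : Nat)) : Int)).2 + 1) := by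
          simp only [stepA]
          rw [hv, if_pos hc]
        rw [hAstep]
        refine ⟨?_, ?_, ?_⟩
        · intro j' hj'
          rcases Nat.lt_or_ge j' (mm+1) with h' | h'
          · exact ih1 j' h'
          · have hj'e : j' = mm+1 := by omega
            subst hj'e
            have hjcs : cs st j = cs st (mm+1) :=
              cs_const st hmono j (mm+1) (by omega) (by omega) (by rw [hjv])
            rw [← hjv, ih1 j hj, hjcs]
        · simp only [Nat.add_sub_cancel]
          rw [ih2, hcs]
          push_cast
          ring
        · intro k
          rw [ih3 k]
          constructor
          · rintro ⟨j', hj', hjk⟩; exact ⟨j', by omega, hjk⟩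
          · rintro ⟨j', hj', hjk⟩
            rcases Nat.lt_or_ge j' (mm+1) with h' | h'
            · exact ⟨j', h', hjk⟩
            · have hj'e : j' = mm+1 := by omega
              subst hj'e
              exact ⟨j, hj, by rw [hjv, hjk]⟩
      · -- new key
        have hkeys : ∀ (r : Int), ∀ k,
            (((loopA st (((mm+1 : Nat)) : Int)).1.insert (st.getD (mm+1) 0) r).contains k = true
              ↔ ∃ j, j < mm + 2 ∧ st.getD j 0 = k) := by
          intro r k
          rw [PySem.Dict.contains_insert]
          simp only [Bool.or_eq_true, beq_iff_eq]
          constructor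
          · rintro (h | h)
            · exact ⟨mm+1, by omega, h.symm⟩
            · obtain ⟨j', hj', hjk⟩ := (ih3 k).1 h
              exact ⟨j', by omega, hjk⟩
          · rintro ⟨j', hj', hjk⟩
            rcases Nat.lt_or_ge j' (mm+1) with h' | h'
            · exact Or.inr ((ih3 k).2 ⟨j', h', hjk⟩)
            · have hj'e : j' = mm+1 := by omega
              subst hj'e
              exact Or.inl hjk.symm
        have hget : ∀ (r : Int), ∀ j', j' < mm + 2 →
            (((loopA st (((mm+1 : Nat)) : Int)).1.insert (st.getD (mm+1) 0) r).get? (st.getD j' 0)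
              = if j' = mm+1 then some r else some ((cs st j' : Int))) := by
          intro r j' hj'
          by_cases hjn : j' = mm+1
          · subst hjn
            rw [PySem.Dict.get?_insert_self, if_pos rfl]
          · have hne : st.getD j' 0 ≠ st.getD (mm+1) 0 := by
              intro he
              exact hc ((ih3 _).2 ⟨j', by omega, he⟩)
            rw [PySem.Dict.get?_insert_of_ne _ _ hne, if_neg hjn, ih1 j' (by omega)]
        by_cases hgt : st.getD (mm+1) 0 > st.getD mm 0 + 1
        · -- gap: a new chain starts at index mm+1
          have hcs : cs st (mm+1) = mm+1 := by rw [cs, if_pos hgt]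
          have hAstep : stepA st (loopA st (((mm+1 : Nat)) : Int)) (((mm+1 : Nat)) : Int)
              = ((loopA st (((mm+1 : Nat)) : Int)).1.insert (st.getD (mm+1) 0) (((mm+1 : Nat)) : Int), 1) := by
            simp only [stepA]
            rw [hv, hp, if_neg hc, if_pos (by omega)]
          rw [hAstep]
          refine ⟨?_, ?_, fun k => hkeys _ k⟩
          · intro j' hj'
            rw [hget _ j' hj']
            by_cases hjn : j' = mm+1
            · subst hjn; rw [if_pos rfl, hcs]
            · rw [if_neg hjn]
          · simp only [Nat.add_sub_cancel]
            rw [hcs]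
            push_cast; ring
        · -- adjacent: the chain continues, rank = cs mm
          have hcs : cs st (mm+1) = cs st mm := by rw [cs, if_neg hgt]
          have hrank : ((((mm+1 : Nat)) : Int) - (loopA st (((mm+1 : Nat)) : Int)).2)
              = ((cs st mm : Nat) : Int) := by
            rw [ih2]
            ring
          have hAstep : stepA st (loopA st (((mm+1 : Nat)) : Int)) (((mm+1 : Nat)) : Int)
              = ((loopA st (((mm+1 : Nat)) : Int)).1.insert (st.getD (mm+1) 0) ((cs st mm : Nat) : Int),
                 (loopA st (((mm+1 : Nat)) : Int)).2 + 1) := by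
            simp only [stepA]
            rw [hv, hp, if_neg hc, if_neg (by omega), hrank]
          rw [hAstep]
          refine ⟨?_, ?_, fun k => hkeys _ k⟩
          · intro j' hj'
            rw [hget _ j' hj']
            by_cases hjn : j' = mm+1
            · subst hjn; rw [if_pos rfl, hcs]
            · rw [if_neg hjn]
          · simp only [Nat.add_sub_cancel]
            rw [ih2, hcs]
            push_cast; ring

-- B's dict loop: each qualifying key v is written the value f v, so lookup of a qualifying member is f
theorem foldB_get? (vs : List Int) (q : Int → Prop) [DecidablePred q] (f : Int → Int) :
    ∀ (d : PySem.Dict Int Int) (t : Int),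
      (vs.foldl (fun d v => if q v then d.insert v (f v) else d) d).get? t
        = if t ∈ vs ∧ q t then some (f t) else d.get? t := by
  induction vs with
  | nil => intro d t; simp
  | cons v rest ih =>
    intro d t
    rw [List.foldl_cons, ih]
    by_cases h : t ∈ rest ∧ q t
    · rw [if_pos h, if_pos ⟨List.mem_cons.2 (Or.inr h.1), h.2⟩]
    · rw [if_neg h]
      by_cases hqv : q v
      · rw [if_pos hqv, PySem.Dict.get?_insert]
        by_cases htv : t = v
        · subst htv
          rw [if_pos rfl, if_pos ⟨List.mem_cons.2 (Or.inl rfl), hqv⟩]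
        · rw [if_neg htv, if_neg (by simp [List.mem_cons, htv]; tauto)]
      · rw [if_neg hqv, if_neg (by simp [List.mem_cons]; rintro (rfl | h') hq <;> [exact hqv hq; exact h ⟨h', hq⟩])]

-- the walk's result is the unique value below w with no predecessor present and everything between present
theorem walkMin_eq (p : List Int) (u : Int) (hnot : u - 1 ∉ p) :
    ∀ w, u ≤ w → (∀ z, u ≤ z → z < w → z ∈ p) → walkMin p w = u := by
  intro w
  induction w using walkMin.induct (present := p) with
  | case1 x h ih =>
    intro hu hall
    rw [walkMin, dif_pos h]
    have hux : u ≤ x - 1 := by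
      rcases eq_or_lt_of_le hu with rfl | hlt
      · exact absurd h hnot
      · omega
    exact ih hux (fun z h1 h2 => hall z h1 (by omega))
  | case2 x h =>
    intro hu hall
    rw [walkMin, dif_neg h]
    rcases eq_or_lt_of_le hu with rfl | hlt
    · rfl
    · exact absurd (hall (x-1) (by omega) (by omega)) h

-- the chain from cs j to j covers every integer between its endpoint values
theorem chain_cover (st : List Int) :
    ∀ j : Nat, j < st.length → ∀ z, st.getD (cs st j) 0 ≤ z → z ≤ st.getD j 0 →
      ∃ i, i < st.length ∧ st.getD i 0 = z := by
  intro j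
  induction j with
  | zero =>
    intro hj z h1 h2
    simp only [cs] at h1
    exact ⟨0, hj, by omega⟩
  | succ j ih =>
    intro hj z h1 h2
    by_cases hg : st.getD (j+1) 0 > st.getD j 0 + 1
    · rw [cs, if_pos hg] at h1
      exact ⟨j+1, hj, by omega⟩
    · rcases eq_or_lt_of_le h2 with rfl | hlt
      · exact ⟨j+1, hj, rfl⟩
      · rw [cs, if_neg hg] at h1
        exact ih (by omega) z h1 (by omega)

-- nothing in the list is one below a chain start
theorem chain_bottom (st : List Int)
    (hmono : ∀ p q : Nat, p ≤ q → q < st.length → st.getD p 0 ≤ st.getD q 0)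
    (j : Nat) (hj : j < st.length) (i : Nat) (hi : i < st.length) :
    st.getD i 0 ≠ st.getD (cs st j) 0 - 1 := by
  intro heq
  have hics : i < cs st j := by
    by_contra hcon
    rw [Nat.not_lt] at hcon
    have := hmono (cs st j) i hcon hi
    omega
  obtain ⟨m, hm⟩ : ∃ m, cs st j = m + 1 := ⟨cs st j - 1, by omega⟩
  have hgap := cs_gap st j m hm
  have hmlen : m < st.length := by
    have := cs_le st j; omega
  have him : st.getD i 0 ≤ st.getD m 0 := hmono i m (by omega) hmlen
  rw [hm] at heq
  omega

-- a count in a sorted-by-index list splits at the boundary index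
theorem countP_split (st : List Int) (u : Int) (m : Nat) (hm : m ≤ st.length)
    (hlo : ∀ i, i < m → st.getD i 0 < u)
    (hhi : ∀ i, m ≤ i → i < st.length → ¬(st.getD i 0 < u)) :
    st.countP (fun x => decide (x < u)) = m := by
  rw [← List.take_append_drop m st, List.countP_append]
  have h1 : (st.take m).countP (fun x => decide (x < u)) = (st.take m).length := by
    apply List.countP_eq_length.2
    intro x hx
    obtain ⟨i, hi, hie⟩ := List.mem_iff_getElem.1 hx
    rw [List.getElem_take] at hie
    have hilt : i < m := by
      rw [List.length_take] at hi; omega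
    have hieD : st.getD i 0 = x := by
      rw [List.getD_eq_getElem _ _ (by omega), hie]
    simp only [decide_eq_true_eq]
    rw [← hieD]
    exact hlo i hilt
  have h2 : (st.drop m).countP (fun x => decide (x < u)) = 0 := by
    apply List.countP_eq_zero.2
    intro x hx
    obtain ⟨i, hi, hie⟩ := List.mem_iff_getElem.1 hx
    rw [List.getElem_drop] at hie
    have hlen : m + i < st.length := by
      rw [List.length_drop] at hi; omega
    have hieD : st.getD (m + i) 0 = x := by
      rw [List.getD_eq_getElem _ _ hlen, hie]
    simp only [decide_eq_true_eq, ← hieD]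
    exact hhi (m+i) (by omega) hlen
  rw [h1, h2, List.length_take]
  omega

-- counting below the chain-start value in the sorted list gives the chain-start index
theorem count_below_cs (st : List Int)
    (hmono : ∀ p q : Nat, p ≤ q → q < st.length → st.getD p 0 ≤ st.getD q 0)
    (j : Nat) (hj : j < st.length) :
    st.countP (fun x => decide (x < st.getD (cs st j) 0)) = cs st j := by
  apply countP_split st _ _ (by have := cs_le st j; omega)
  · intro i hi
    obtain ⟨m, hm⟩ : ∃ m, cs st j = m + 1 := ⟨cs st j - 1, by omega⟩
    have hgap := cs_gap st j m hm
    have hmlen : m < st.length := by have := cs_le st j; omega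
    have him : st.getD i 0 ≤ st.getD m 0 := hmono i m (by omega) hmlen
    rw [hm]
    omega
  · intro i h1 h2
    have := hmono (cs st j) i h1 h2
    omega

-- ===== VERDICT (by name: the statement is the Claim_ definition above) =====
theorem grade_runners_spec : Claim_equal_grade_runners := by
  intro amount times _ hpre
  obtain ⟨hne, hlen, hlow, hbound⟩ := hpre
  unfold Spec_grade_runners
  rw [show grade_runners amount times = times.map
        (fun t => (loopA (PySem.List.sorted times (fun x => x) false) amount).1.getD t 0 + 1) from rfl,
    show grade_runners_alt amount times = times.map
        (fun t => (List.foldl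
            (fun d v => if v ≤ PySem.List.pyGetD (PySem.List.sorted times (fun x => x) false) (amount - 1) 0
              then d.insert v (countBelow times (walkMin (PySem.Set.ofList times) v)) else d)
            PySem.Dict.empty (PySem.Set.ofList times)).getD t 0 + 1) from rfl]
  set st := PySem.List.sorted times (fun x => x) false with hst
  have hstlen : st.length = times.length := PySem.List.length_sorted times _ _
  have hmono : ∀ p q : Nat, p ≤ q → q < st.length → st.getD p 0 ≤ st.getD q 0 :=
    sorted_getD_mono times
  have hpos : 0 < times.length := List.length_pos_iff.2 hne
  have hmemst : ∀ z : Int, (∃ i, i < st.length ∧ st.getD i 0 = z) → z ∈ times := by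
    rintro z ⟨i', hi', he'⟩
    rw [List.getD_eq_getElem _ _ hi'] at he'
    exact (PySem.List.mem_sorted times (fun x => x) false _).1 (he' ▸ List.getElem_mem hi')
  have hcountP : ∀ u : Int, countBelow times u
      = ((times.countP (fun x => decide (x < u)) : Nat) : Int) := by
    intro u
    unfold countBelow
    rw [PySem.List.foldl_ite_add_one]
    simp
  have hperm : ∀ u : Int, times.countP (fun x => decide (x < u))
      = st.countP (fun x => decide (x < u)) :=
    fun u => ((PySem.List.sorted_perm times (fun x => x) false).countP_eq _).symm
  apply List.map_congr_left
  intro t ht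
  have htst : t ∈ st := (PySem.List.mem_sorted times (fun x => x) false _).2 ht
  obtain ⟨i, hi, hie⟩ := List.mem_iff_getElem.1 htst
  have hieD : st.getD i 0 = t := by rw [List.getD_eq_getElem _ _ hi, hie]
  have hmempres : t ∈ PySem.Set.ofList times := (PySem.Set.mem_ofList _ _).2 ht
  by_cases ha : 1 ≤ amount
  · -- the graded case: every time lies in the sorted prefix of length amount
    set n : Nat := amount.toNat with hn
    have hna : (n : Int) = amount := by omega
    have hn1 : 1 ≤ n := by omega
    have hnlen : n ≤ st.length := by rw [hstlen]; omega
    have hcut : PySem.List.pyGetD st (amount - 1) 0 = st.getD (n-1) 0 := by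
      rw [show amount - 1 = ((n-1 : Nat) : Int) by omega, PySem.List.pyGetD_natCast]
    have hboundD : ∀ t' ∈ times, t' ≤ st.getD (n-1) 0 := by
      intro t' ht'
      have h := hbound t' ht'
      rw [show max (amount - 1) 0 = ((n-1 : Nat) : Int) by omega,
        PySem.List.pyGetD_natCast] at h
      exact h
    obtain ⟨hget, -, -⟩ := invA st hmono n hn1 hnlen
    rw [← hna]
    obtain ⟨j, hj, hje⟩ : ∃ j, j < n ∧ st.getD j 0 = t := by
      rcases Nat.lt_or_ge i n with h | h
      · exact ⟨i, h, hieD⟩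
      · refine ⟨n-1, by omega, ?_⟩
        have h1 := hmono (n-1) i (by omega) hi
        have h2 := hboundD t ht
        omega
    rw [PySem.Dict.getD_eq_get?_getD, ← hje, hget j hj]
    have hqual : st.getD j 0 ≤ PySem.List.pyGetD st (↑n - 1) 0 := by
      rw [← hna] at hcut
      rw [hcut]
      exact hmono j (n-1) (by omega) (by omega)
    rw [PySem.Dict.getD_eq_get?_getD, foldB_get?, if_pos ⟨hje ▸ hmempres, hqual⟩]
    simp only [Option.getD_some]
    have hwm : walkMin (PySem.Set.ofList times) (st.getD j 0) = st.getD (cs st j) 0 := by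
      apply walkMin_eq
      · intro hmem
        have hz : st.getD (cs st j) 0 - 1 ∈ times := (PySem.Set.mem_ofList _ _).1 hmem
        obtain ⟨i', hi', he'⟩ := List.mem_iff_getElem.1 ((PySem.List.mem_sorted times (fun x => x) false _).2 hz)
        have he'D : st.getD i' 0 = st.getD (cs st j) 0 - 1 := by
          rw [List.getD_eq_getElem _ _ hi', he']
        exact chain_bottom st hmono j (by omega) i' hi' he'D
      · exact hmono (cs st j) j (cs_le st j) (by omega)
      · intro z h1 h2
        have := chain_cover st j (by omega) z h1 (by omega)
        exact (PySem.Set.mem_ofList _ _).2 (hmemst z this)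
    rw [hwm, hcountP, hperm, count_below_cs st hmono j (by omega)]
  · -- amount ≤ 0: Pre_ forces an all-equal list; both sides grade everyone rank 1
    have hidx0 : max (amount - 1) 0 = (0 : Int) := by omega
    have hbound0 : ∀ t' ∈ times, t' ≤ st.getD 0 0 := by
      intro t' ht'
      have h := hbound t' ht'
      rw [hidx0, show (0 : Int) = ((0 : Nat) : Int) from rfl, PySem.List.pyGetD_natCast] at h
      exact h
    have hall : ∀ x ∈ times, x = st.getD 0 0 := by
      intro x hx
      obtain ⟨i', hi', he'⟩ := List.mem_iff_getElem.1
        ((PySem.List.mem_sorted times (fun x => x) false _).2 hx)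
      have he'D : st.getD i' 0 = x := by rw [List.getD_eq_getElem _ _ hi', he']
      have := hmono 0 i' (by omega) hi'
      have := hbound0 x hx
      omega
    have hallst : ∀ k, k < st.length → st.getD k 0 = st.getD 0 0 := by
      intro k hk
      exact hall _ (hmemst _ ⟨k, hk, rfl⟩)
    have ht0 : t = st.getD 0 0 := hall t ht
    have hApy : PySem.List.pyGetD st 0 0 = st.getD 0 0 := by
      rw [show (0 : Int) = ((0 : Nat) : Int) from rfl, PySem.List.pyGetD_natCast]
    have hcut : PySem.List.pyGetD st (amount - 1) 0 = st.getD 0 0 := by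
      have h1 : ¬ (0 ≤ amount - 1) := by omega
      have h2 : -(st.length : Int) ≤ amount - 1 := by omega
      have hklt : st.length - (-(amount-1)).toNat < st.length := by omega
      simp only [PySem.List.pyGetD, PySem.List.pyGet?, PySem.List.pyIdx?, if_neg h1, if_pos h2,
        Option.bind_some, List.getElem?_eq_getElem hklt, Option.getD_some]
      rw [← List.getD_eq_getElem _ 0 hklt]
      exact hallst _ hklt
    have hA0 : (loopA st amount).1.getD t 0 = 0 := by
      unfold loopA
      rw [PySem.List.pyRange_one_eq_nil (by omega : amount ≤ 1)]
      show ((PySem.Dict.empty).insert (PySem.List.pyGetD st 0 0) 0).getD t 0 = 0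
      rw [PySem.Dict.getD_eq_get?_getD, hApy, ← ht0, PySem.Dict.get?_insert_self]
      rfl
    rw [hA0]
    have hqual : t ≤ PySem.List.pyGetD st (amount - 1) 0 := by rw [hcut]; omega
    rw [PySem.Dict.getD_eq_get?_getD, foldB_get?, if_pos ⟨hmempres, hqual⟩]
    simp only [Option.getD_some]
    have hwm : walkMin (PySem.Set.ofList times) t = t := by
      apply walkMin_eq
      · intro hmem
        have := hall _ ((PySem.Set.mem_ofList _ _).1 hmem)
        omega
      · exact le_refl t
      · intro z h1 h2; omega
    rw [hwm, hcountP]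
    have hzero : times.countP (fun x => decide (x < t)) = 0 := by
      apply List.countP_eq_zero.2
      intro x hx
      have := hall x hx
      simp only [decide_eq_true_eq]
      omega
    rw [hzero]
    rfl
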